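-- pv_equiv track=rewrite | github.com/C-force/code | logsum/naive_algorithm.py | naive_algo_variable_id_assignment
-- ===== SOURCE A (Python) =====
-- def naive_algo_variable_id_assignment(log_content,var_index):
--     naive_var_index = []
--     global_var_idx = 0
--     current_var_assign = {}
--     for log_id in range(len(log_content)):
--         logkey = " ".join(log_content[log_id])
--         if logkey not in current_var_assign:
--             var_list = []
--             for j in range(len(var_index[log_id])):
--                 var_list.append(global_var_idx if var_index[log_id][j] is not None else None)
--                 global_var_idx += 1
--             current_var_assign[logkey] = var_list
--         var_list = current_var_assign[logkey]
--         naive_var_index.append(var_list)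
--     return naive_var_index
-- ===== SOURCE B (Python) =====
-- def naive_algo_variable_id_assignment(log_content, var_index):
--     # Dict-free, index-based algorithm: for each entry find the index of the
--     # FIRST entry with the same joined key via list.index; a prefix-sum pass
--     # assigns each position its base id (counter advances by the row length at
--     # first occurrences only); result rows are built once per first occurrence
--     # and every entry picks the row of its first occurrence.
--     keys = [" ".join(ws) for ws in log_content]
--     first = [keys.index(k) for k in keys]
--     n = len(keys)
--     base = []
--     g = 0
--     for i in range(n):
--         base.append(g)
--         if first[i] == i:
--             g += len(var_index[i])
--     rows = [[base[i] + j if v is not None else None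
--              for j, v in enumerate(var_index[i])] if first[i] == i else None
--             for i in range(n)]
--     return [rows[first[i]] for i in range(n)]
-- ===== Notes on version B (the rewrite author's own statement) =====
-- stated objective: alternative
-- what changed: Replaces A's single pass with a hash dict memoizing id lists per key by a dict-free index-based algorithm: list.index finds each entry's first occurrence, a prefix-sum pass over row lengths at first occurrences yields each base id, rows are built per first occurrence and the output is assembled by positional lookup.
import Mathlib
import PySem

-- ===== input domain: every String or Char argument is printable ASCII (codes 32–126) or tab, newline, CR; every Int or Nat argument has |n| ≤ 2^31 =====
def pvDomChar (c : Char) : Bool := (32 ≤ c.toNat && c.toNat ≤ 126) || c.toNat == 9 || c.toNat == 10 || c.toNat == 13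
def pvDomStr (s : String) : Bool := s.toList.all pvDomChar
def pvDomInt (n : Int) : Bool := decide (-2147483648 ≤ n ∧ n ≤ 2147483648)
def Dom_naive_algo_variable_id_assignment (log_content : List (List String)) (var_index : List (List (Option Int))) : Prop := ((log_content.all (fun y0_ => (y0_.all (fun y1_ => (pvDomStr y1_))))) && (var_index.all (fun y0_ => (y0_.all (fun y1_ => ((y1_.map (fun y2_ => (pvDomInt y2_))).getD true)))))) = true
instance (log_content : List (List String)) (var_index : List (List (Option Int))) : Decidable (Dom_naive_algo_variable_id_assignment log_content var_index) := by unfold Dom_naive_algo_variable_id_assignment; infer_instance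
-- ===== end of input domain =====

-- B replaces A's dict-memoizing single pass by a dict-free index-based algorithm:
-- list.index finds each entry's first occurrence, a prefix-sum pass over row
-- lengths at first occurrences yields base ids, and the output is assembled by
-- positional lookup; return values only (A performs no observable mutation).

-- ===== PORT A =====
def naive_algo_variable_id_assignment (log_content : List (List String)) (var_index : List (List (Option Int))) : List (List (Option Int)) :=
  (((PySem.List.pyRange 0 (log_content.length : Int) 1).foldl
    (fun (st : List (List (Option Int)) × Int × PySem.Dict String (List (Option Int))) (log_id : Int) =>
      let logkey := PySem.Str.join " " (PySem.List.pyGetD log_content log_id [])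
      let gd :=
        if st.2.2.contains logkey then st.2
        else
          let row := PySem.List.pyGetD var_index log_id []
          let r :=
            (PySem.List.pyRange 0 (row.length : Int) 1).foldl
              (fun (p : List (Option Int) × Int) (j : Int) =>
                (p.1 ++ [if (PySem.List.pyGetD row j none).isSome then some p.2 else none], p.2 + 1))
              ([], st.2.1)
          (r.2, st.2.2.insert logkey r.1)
      (st.1 ++ [gd.2.getD logkey []], gd))
    ([], 0, PySem.Dict.empty)).1)

-- ===== PORT B =====
-- faithful to Source B: keys, first-occurrence indices via list.index (always found,
-- so the .getD 0 default is unreachable), prefix-sum base list, rows (the Python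
-- None placeholder is Option's none, never selected), positional assembly.
def naive_algo_variable_id_assignment_alt (log_content : List (List String)) (var_index : List (List (Option Int))) : List (List (Option Int)) :=
  let keys := log_content.map (fun ws => PySem.Str.join " " ws)
  let first := keys.map (fun k => (((PySem.List.index? keys k).getD 0 : Nat) : Int))
  let n := (keys.length : Int)
  let bg :=
    (PySem.List.pyRange 0 n 1).foldl
      (fun (p : List Int × Int) (i : Int) =>
        (p.1 ++ [p.2],
         if PySem.List.pyGetD first i (-1) == i
         then p.2 + ((PySem.List.pyGetD var_index i []).length : Int) else p.2))
      ([], 0)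
  let base := bg.1
  let rows :=
    (PySem.List.pyRange 0 n 1).map
      (fun i =>
        if PySem.List.pyGetD first i (-1) == i
        then some ((PySem.List.enumerate (PySem.List.pyGetD var_index i [])).map
               (fun p => if p.2.isSome then some (PySem.List.pyGetD base i 0 + p.1) else none))
        else none)
  (PySem.List.pyRange 0 n 1).map
    (fun i => (PySem.List.pyGetD rows (PySem.List.pyGetD first i (-1)) none).getD [])

-- ===== PRECONDITION & SPEC =====
-- Pre_ excludes exactly the inputs on which A raises IndexError: an entry whose
-- joined key appears for the first time at an index beyond len(var_index).
def Pre_naive_algo_variable_id_assignment (log_content : List (List String)) (var_index : List (List (Option Int))) : Prop :=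
  ∀ i < log_content.length,
    (∀ j < i, PySem.Str.join " " (log_content.getD j []) ≠ PySem.Str.join " " (log_content.getD i [])) →
    i < var_index.length
instance (log_content : List (List String)) (var_index : List (List (Option Int))) : Decidable (Pre_naive_algo_variable_id_assignment log_content var_index) := by unfold Pre_naive_algo_variable_id_assignment; infer_instance
def pvWitness_naive_algo_variable_id_assignment : List (List String) × List (List (Option Int)) :=
  ([["a"], ["a"], ["b"]], [[some 1, none], [none], [none, some 2]])

def Spec_naive_algo_variable_id_assignment (log_content : List (List String)) (var_index : List (List (Option Int))) (out : List (List (Option Int))) : Prop := out = naive_algo_variable_id_assignment_alt log_content var_index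
instance (log_content : List (List String)) (var_index : List (List (Option Int))) (out : List (List (Option Int))) : Decidable (Spec_naive_algo_variable_id_assignment log_content var_index out) := by unfold Spec_naive_algo_variable_id_assignment; infer_instance

-- ===== CLAIM (what is proved, stated in full; the proofs are below) =====
def Claim_equal_naive_algo_variable_id_assignment : Prop := ∀ (log_content : List (List String)) (var_index : List (List (Option Int))), Dom_naive_algo_variable_id_assignment log_content var_index → Pre_naive_algo_variable_id_assignment log_content var_index → Spec_naive_algo_variable_id_assignment log_content var_index (naive_algo_variable_id_assignment log_content var_index)

-- ===== LEMMAS AND PROOFS =====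

-- the id list assigned to a row when the running counter stands at g
def pvIdsFrom (g : Int) : List (Option Int) → List (Option Int)
  | [] => []
  | v :: t => (if v.isSome then some g else none) :: pvIdsFrom (g + 1) t

-- canonical first pass over the zipped entries (proof-side model of A's state)
def pvBuild : List (List String × List (Option Int)) → Int × PySem.Dict String (List (Option Int)) → Int × PySem.Dict String (List (Option Int))
  | [], st => st
  | (ws, row) :: rest, st =>
      if st.2.contains (PySem.Str.join " " ws) then pvBuild rest st
      else pvBuild rest (st.1 + (row.length : Int), st.2.insert (PySem.Str.join " " ws) (pvIdsFrom st.1 row))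

-- A's outer-loop body, named so the prefix invariant can be stated
def pvAStep (log_content : List (List String)) (var_index : List (List (Option Int)))
    (st : List (List (Option Int)) × Int × PySem.Dict String (List (Option Int))) (log_id : Int) :
    List (List (Option Int)) × Int × PySem.Dict String (List (Option Int)) :=
  let logkey := PySem.Str.join " " (PySem.List.pyGetD log_content log_id [])
  let gd :=
    if st.2.2.contains logkey then st.2
    else
      let row := PySem.List.pyGetD var_index log_id []
      let r :=
        (PySem.List.pyRange 0 (row.length : Int) 1).foldl
          (fun (p : List (Option Int) × Int) (j : Int) =>
            (p.1 ++ [if (PySem.List.pyGetD row j none).isSome then some p.2 else none], p.2 + 1))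
          ([], st.2.1)
      (r.2, st.2.2.insert logkey r.1)
  (st.1 ++ [gd.2.getD logkey []], gd)

-- the key list and first-occurrence values of B
def pvKeys (lc : List (List String)) : List String := lc.map (fun ws => PySem.Str.join " " ws)
def pvGSeq (lc : List (List String)) (vi : List (List (Option Int))) (m : Nat) : Int :=
  (pvBuild ((lc.zip vi).take m) (0, PySem.Dict.empty)).1
def pvTable (lc : List (List String)) (vi : List (List (Option Int))) : PySem.Dict String (List (Option Int)) :=
  (pvBuild (lc.zip vi) (0, PySem.Dict.empty)).2

theorem pvA_eq_step_fold (lc : List (List String)) (vi : List (List (Option Int))) :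
    naive_algo_variable_id_assignment lc vi
      = ((PySem.List.pyRange 0 (lc.length : Int) 1).foldl (pvAStep lc vi) ([], 0, PySem.Dict.empty)).1 := rfl

theorem pv_inner_foldl (row : List (Option Int)) (a : List (Option Int)) (g : Int) :
    row.foldl (fun (p : List (Option Int) × Int) v => (p.1 ++ [if v.isSome then some p.2 else none], p.2 + 1)) (a, g)
      = (a ++ pvIdsFrom g row, g + (row.length : Int)) := by
  induction row generalizing a g with
  | nil => simp [pvIdsFrom]
  | cons v t ih =>
      rw [List.foldl_cons, ih]
      simp [pvIdsFrom]
      omega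

theorem pv_enum_map (row : List (Option Int)) (s g : Int) :
    (PySem.List.enumerate row s).map (fun p => if p.2.isSome then some (g + p.1) else none)
      = pvIdsFrom (g + s) row := by
  induction row generalizing s with
  | nil => simp [pvIdsFrom, PySem.List.enumerate_nil]
  | cons v t ih =>
      simp only [PySem.List.enumerate_cons, List.map_cons, ih, pvIdsFrom]
      have h1 : g + (s + 1) = g + s + 1 := by ring
      rw [h1]

theorem pvBuild_append (l1 l2 : List (List String × List (Option Int))) (st : Int × PySem.Dict String (List (Option Int))) :
    pvBuild (l1 ++ l2) st = pvBuild l2 (pvBuild l1 st) := by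
  induction l1 generalizing st with
  | nil => rfl
  | cons p t ih => obtain ⟨ws, row⟩ := p; simp only [List.cons_append, pvBuild]; split_ifs <;> apply ih

theorem pvBuild_persist (l : List (List String × List (Option Int))) (st : Int × PySem.Dict String (List (Option Int)))
    (k : String) (v : List (Option Int))
    (h : st.2.get? k = some v) : (pvBuild l st).2.get? k = some v := by
  induction l generalizing st with
  | nil => exact h
  | cons p t ih =>
      obtain ⟨ws, row⟩ := p
      simp only [pvBuild]
      split_ifs with hc
      · exact ih _ h
      · apply ih
        have hne : k ≠ PySem.Str.join " " ws := by
          intro he; rw [← he] at hc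
          rw [PySem.Dict.contains_eq_isSome_get?, h] at hc; simp at hc
        simpa [PySem.Dict.get?_insert, hne] using h

theorem pv_range_snoc {α : Type} (f : α → Int → α) (init : α) (n : Nat) :
    (PySem.List.pyRange 0 ((n : Int) + 1) 1).foldl f init
      = f ((PySem.List.pyRange 0 (n : Int) 1).foldl f init) (n : Int) := by
  rw [PySem.List.pyRange_one_succ_right (by positivity)]
  simp

theorem pv_pyRange_natCast (n : Nat) :
    PySem.List.pyRange 0 (n : Int) 1 = (List.range n).map (fun k : Nat => (k : Int)) := by
  apply List.ext_getElem
  · simp [PySem.List.length_pyRange_one]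
  · intro i h1 h2
    rw [PySem.List.getElem_pyRange_one, List.getElem_map, List.getElem_range]
    omega

theorem pvAStep_mem (lc : List (List String)) (vi : List (List (Option Int)))
    (acc : List (List (Option Int))) (st2 : Int × PySem.Dict String (List (Option Int))) (n : Nat)
    (hc : st2.2.contains (PySem.Str.join " " (lc.getD n [])) = true) :
    pvAStep lc vi (acc, st2) (n : Int)
      = (acc ++ [st2.2.getD (PySem.Str.join " " (lc.getD n [])) []], st2) := by
  simp [pvAStep, PySem.List.pyGetD_natCast, ← List.getD_eq_getElem?_getD, hc]

theorem pvAStep_new (lc : List (List String)) (vi : List (List (Option Int)))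
    (acc : List (List (Option Int))) (st2 : Int × PySem.Dict String (List (Option Int))) (n : Nat)
    (hc : st2.2.contains (PySem.Str.join " " (lc.getD n [])) = false) :
    pvAStep lc vi (acc, st2) (n : Int)
      = (acc ++ [pvIdsFrom st2.1 (vi.getD n [])],
         st2.1 + ((vi.getD n []).length : Int),
         st2.2.insert (PySem.Str.join " " (lc.getD n [])) (pvIdsFrom st2.1 (vi.getD n []))) := by
  simp only [pvAStep, PySem.List.pyGetD_natCast, ← List.getD_eq_getElem?_getD, hc,
    Bool.false_eq_true, if_false]
  rw [PySem.List.foldl_pyRange_zero_pyGetD' (vi.getD n []) none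
        (fun (p : List (Option Int) × Int) v => (p.1 ++ [if v.isSome then some p.2 else none], p.2 + 1))
        ([], st2.1)]
  rw [pv_inner_foldl]
  simp [PySem.Dict.getD_insert_self]

-- the prefix invariant: after n outer steps, A's accumulator is the final-table
-- lookup over the first n entries, and A's (counter, dict) is pvBuild of the
-- first n zipped entries, whose key set is the set of keys of the first n entries.
theorem pv_invariant (lc : List (List String)) (vi : List (List (Option Int)))
    (hpre : Pre_naive_algo_variable_id_assignment lc vi) (n : Nat) (hn : n ≤ lc.length) :
    ((PySem.List.pyRange 0 (n : Int) 1).foldl (pvAStep lc vi) ([], 0, PySem.Dict.empty)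
      = ((lc.take n).map (fun ws => (pvBuild (lc.zip vi) (0, PySem.Dict.empty)).2.getD (PySem.Str.join " " ws) []),
         pvBuild ((lc.zip vi).take n) (0, PySem.Dict.empty)))
    ∧ ∀ k, (pvBuild ((lc.zip vi).take n) (0, PySem.Dict.empty)).2.contains k = true
            ↔ ∃ j < n, PySem.Str.join " " (lc.getD j []) = k := by
  induction n with
  | zero =>
      constructor
      · simp [PySem.List.pyRange_one_eq_nil, pvBuild]
      · intro k; simp [pvBuild]
  | succ n ih =>
      have hn' : n ≤ lc.length := Nat.le_of_succ_le hn
      have hnlt : n < lc.length := hn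
      obtain ⟨ihA, ihK⟩ := ih hn'
      have hsnoc := pv_range_snoc (pvAStep lc vi) ([], 0, PySem.Dict.empty) n
      have hcast : ((n + 1 : Nat) : Int) = (n : Int) + 1 := by push_cast; ring
      have hlcget : lc.getD n [] = lc[n]'hnlt := List.getD_eq_getElem lc [] hnlt
      have hsplit : lc.zip vi = (lc.zip vi).take n ++ (lc.zip vi).drop n :=
        (List.take_append_drop n (lc.zip vi)).symm
      have hsplit1 : lc.zip vi = (lc.zip vi).take (n + 1) ++ (lc.zip vi).drop (n + 1) :=
        (List.take_append_drop (n + 1) (lc.zip vi)).symm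
      by_cases hc : (pvBuild ((lc.zip vi).take n) (0, PySem.Dict.empty)).2.contains
          (PySem.Str.join " " (lc.getD n [])) = true
      · -- seen key: state unchanged, output is a final-table lookup
        have htake : (lc.zip vi).take (n + 1) = (lc.zip vi).take n ++ ((lc.zip vi)[n]?).toList :=
          List.take_succ
        have hstep1 : pvBuild (((lc.zip vi)[n]?).toList) (pvBuild ((lc.zip vi).take n) (0, PySem.Dict.empty))
            = pvBuild ((lc.zip vi).take n) (0, PySem.Dict.empty) := by
          cases hzn : (lc.zip vi)[n]? with
          | none => rfl
          | some p =>
              have hnz : n < (lc.zip vi).length := by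
                by_contra hge
                rw [List.getElem?_eq_none (by omega)] at hzn; cases hzn
              have hp : p = ((lc.zip vi)[n]'hnz) := by
                rw [List.getElem?_eq_getElem hnz] at hzn; exact (Option.some_inj.mp hzn).symm
              have hfst : p.1 = lc[n]'hnlt := by rw [hp, List.getElem_zip]
              have hcond : (pvBuild ((lc.zip vi).take n) (0, PySem.Dict.empty)).2.contains
                  (PySem.Str.join " " p.1) = true := by
                rw [hfst, ← hlcget]; exact hc
              simp only [Option.toList, pvBuild]
              simp [hcond]
        have hbuild : pvBuild ((lc.zip vi).take (n + 1)) (0, PySem.Dict.empty)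
            = pvBuild ((lc.zip vi).take n) (0, PySem.Dict.empty) := by
          rw [htake, pvBuild_append, hstep1]
        have hval : (pvBuild ((lc.zip vi).take n) (0, PySem.Dict.empty)).2.getD (PySem.Str.join " " (lc.getD n [])) []
            = (pvBuild (lc.zip vi) (0, PySem.Dict.empty)).2.getD (PySem.Str.join " " (lc.getD n [])) [] := by
          have hsome : ((pvBuild ((lc.zip vi).take n) (0, PySem.Dict.empty)).2.get?
              (PySem.Str.join " " (lc.getD n []))).isSome = true := by
            rw [← PySem.Dict.contains_eq_isSome_get?]; exact hc
          obtain ⟨v, hv⟩ := Option.isSome_iff_exists.mp hsome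
          have hfin : (pvBuild (lc.zip vi) (0, PySem.Dict.empty)).2.get? (PySem.Str.join " " (lc.getD n [])) = some v := by
            rw [hsplit, pvBuild_append]
            exact pvBuild_persist _ _ _ _ hv
          rw [PySem.Dict.getD_eq_get?_getD, PySem.Dict.getD_eq_get?_getD, hv, hfin]
        refine ⟨?_, ?_⟩
        · rw [hcast, hsnoc, ihA, pvAStep_mem lc vi _ _ n hc, hbuild]
          rw [List.take_succ, List.getElem?_eq_getElem hnlt]
          simp only [hlcget] at hval
          simp [List.getElem?_eq_getElem hnlt, hval]
          rw [List.take_succ]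
          simp [List.getElem?_map, List.getElem?_eq_getElem hnlt, hval, List.getD_eq_getElem?_getD]
        · intro k
          rw [hbuild, ihK]
          constructor
          · rintro ⟨j, hj, he⟩; exact ⟨j, by omega, he⟩
          · rintro ⟨j, hj, he⟩
            by_cases hjn : j < n
            · exact ⟨j, hjn, he⟩
            · have hjn' : j = n := by omega
              subst hjn'
              exact (ihK k).mp (he ▸ hc)
      · -- new key: Pre_ gives n < len(var_index); dict gains the key
        have hcf : (pvBuild ((lc.zip vi).take n) (0, PySem.Dict.empty)).2.contains
            (PySem.Str.join " " (lc.getD n [])) = false := by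
          cases hcc : (pvBuild ((lc.zip vi).take n) (0, PySem.Dict.empty)).2.contains
              (PySem.Str.join " " (lc.getD n [])) with
          | false => rfl
          | true => exact absurd hcc hc
        have hfirst : ∀ j < n, PySem.Str.join " " (lc.getD j []) ≠ PySem.Str.join " " (lc.getD n []) := by
          intro j hj he
          exact hc ((ihK _).mpr ⟨j, hj, he⟩)
        have hvn : n < vi.length := by
          apply hpre n hnlt
          intro j hj
          exact hfirst j hj
        have hnz : n < (lc.zip vi).length := by
          rw [List.length_zip]; omega
        have hvget : vi.getD n [] = vi[n]'hvn := List.getD_eq_getElem vi [] hvn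
        have hpair : (lc.zip vi)[n]'hnz = (lc[n]'hnlt, vi[n]'hvn) := by
          rw [List.getElem_zip]
        have htake : (lc.zip vi).take (n + 1) = (lc.zip vi).take n ++ [(lc[n]'hnlt, vi[n]'hvn)] := by
          rw [List.take_succ, List.getElem?_eq_getElem hnz, hpair]; rfl
        have hbuild : pvBuild ((lc.zip vi).take (n + 1)) (0, PySem.Dict.empty)
            = ((pvBuild ((lc.zip vi).take n) (0, PySem.Dict.empty)).1 + ((vi.getD n []).length : Int),
               (pvBuild ((lc.zip vi).take n) (0, PySem.Dict.empty)).2.insert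
                 (PySem.Str.join " " (lc.getD n [])) (pvIdsFrom (pvBuild ((lc.zip vi).take n) (0, PySem.Dict.empty)).1 (vi.getD n []))) := by
          rw [htake, pvBuild_append]
          simp only [pvBuild]
          rw [← hlcget, ← hvget, if_neg hc]
        have hval : (pvBuild (lc.zip vi) (0, PySem.Dict.empty)).2.getD (PySem.Str.join " " (lc.getD n [])) []
            = pvIdsFrom (pvBuild ((lc.zip vi).take n) (0, PySem.Dict.empty)).1 (vi.getD n []) := by
          have hins : (pvBuild ((lc.zip vi).take (n + 1)) (0, PySem.Dict.empty)).2.get?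
              (PySem.Str.join " " (lc.getD n []))
              = some (pvIdsFrom (pvBuild ((lc.zip vi).take n) (0, PySem.Dict.empty)).1 (vi.getD n [])) := by
            rw [hbuild]
            exact PySem.Dict.get?_insert_self _ _ _
          have hdecomp : pvBuild (lc.zip vi) (0, PySem.Dict.empty)
              = pvBuild ((lc.zip vi).drop (n + 1)) (pvBuild ((lc.zip vi).take (n + 1)) (0, PySem.Dict.empty)) := by
            conv_lhs => rw [hsplit1]
            rw [pvBuild_append]
          have hfin : (pvBuild (lc.zip vi) (0, PySem.Dict.empty)).2.get? (PySem.Str.join " " (lc.getD n []))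
              = some (pvIdsFrom (pvBuild ((lc.zip vi).take n) (0, PySem.Dict.empty)).1 (vi.getD n [])) := by
            rw [hdecomp]
            exact pvBuild_persist _ _ _ _ hins
          rw [PySem.Dict.getD_eq_get?_getD, hfin]; rfl
        refine ⟨?_, ?_⟩
        · rw [hcast, hsnoc, ihA, pvAStep_new lc vi _ _ n hcf, hbuild]
          rw [List.take_succ, List.getElem?_eq_getElem hnlt]
          simp only [hlcget] at hval
          simp [List.getElem?_eq_getElem hnlt, hval]
          rw [List.take_succ]
          simp [List.getElem?_map, List.getElem?_eq_getElem hnlt, hval, List.getD_eq_getElem?_getD]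
        · intro k
          rw [hbuild]
          simp only [PySem.Dict.contains_insert, Bool.or_eq_true, beq_iff_eq]
          constructor
          · rintro (he | hck)
            · exact ⟨n, by omega, he.symm⟩
            · obtain ⟨j, hj, hje⟩ := (ihK k).mp hck
              exact ⟨j, by omega, hje⟩
          · rintro ⟨j, hj, hje⟩
            by_cases hjn : j < n
            · exact Or.inr ((ihK k).mpr ⟨j, hjn, hje⟩)
            · have hjn' : j = n := by omega
              subst hjn'
              exact Or.inl hje.symm

-- ---- B-side lemmas ----

theorem pv_keys_getD (lc : List (List String)) (j : Nat) (hj : j < lc.length) :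
    (pvKeys lc).getD j "" = PySem.Str.join " " (lc.getD j []) := by
  have hj' : j < (pvKeys lc).length := by simpa [pvKeys] using hj
  rw [List.getD_eq_getElem _ _ hj', List.getD_eq_getElem _ _ hj]
  simp [pvKeys]

-- keys.index(keys[i]) : always found, at an index f ≤ i with the same key and
-- no earlier equal key
theorem pv_first_spec (keys : List String) (i : Nat) (hi : i < keys.length) :
    ∃ f : Nat, PySem.List.index? keys (keys.getD i "") = some f ∧ f ≤ i ∧
      keys.getD f "" = keys.getD i "" ∧ ∀ j < f, keys.getD j "" ≠ keys.getD i "" := by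
  have hmem : keys.getD i "" ∈ keys := by
    rw [List.getD_eq_getElem _ _ hi]; exact List.getElem_mem hi
  have hsome : (PySem.List.index? keys (keys.getD i "")).isSome = true :=
    (PySem.List.index?_isSome_iff _ _).mpr hmem
  obtain ⟨f, hf⟩ := Option.isSome_iff_exists.mp hsome
  obtain ⟨hk, hkeq, hprev⟩ := PySem.List.getElem_of_index?_eq_some hf
  refine ⟨f, hf, ?_, ?_, ?_⟩
  · by_contra hgt
    exact hprev i (by omega) (by rw [← List.getD_eq_getElem _ _ hi])
  · rw [List.getD_eq_getElem _ _ hk, hkeq]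
  · intro j hj
    have hjk : j < keys.length := by omega
    rw [List.getD_eq_getElem _ _ hjk]
    exact hprev j hj

-- the value B reads out of `first` at position m
theorem pv_first_val (lc : List (List String)) (m : Nat) (hm : m < lc.length) :
    ∃ f : Nat,
      PySem.List.pyGetD ((pvKeys lc).map (fun k => (((PySem.List.index? (pvKeys lc) k).getD 0 : Nat) : Int))) (m : Int) (-1) = (f : Int)
      ∧ f ≤ m ∧ (pvKeys lc).getD f "" = (pvKeys lc).getD m ""
      ∧ ∀ j < f, (pvKeys lc).getD j "" ≠ (pvKeys lc).getD m "" := by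
  have hmk : m < (pvKeys lc).length := by simpa [pvKeys] using hm
  obtain ⟨f, hf, hle, heq, hprev⟩ := pv_first_spec (pvKeys lc) m hmk
  refine ⟨f, ?_, hle, heq, hprev⟩
  rw [PySem.List.pyGetD_natCast]
  have hmm : m < ((pvKeys lc).map (fun k => (((PySem.List.index? (pvKeys lc) k).getD 0 : Nat) : Int))).length := by
    simpa using hmk
  rw [List.getD_eq_getElem _ _ hmm]
  simp only [List.getElem_map]
  rw [← List.getD_eq_getElem _ "" hmk, hf]
  rfl

-- pvGSeq step: the counter advances by the row length exactly at first occurrences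
theorem pv_gseq_step (lc : List (List String)) (vi : List (List (Option Int)))
    (hpre : Pre_naive_algo_variable_id_assignment lc vi) (m : Nat) (hm : m < lc.length) :
    ((∀ j < m, (pvKeys lc).getD j "" ≠ (pvKeys lc).getD m "") →
       pvGSeq lc vi (m + 1) = pvGSeq lc vi m + ((vi.getD m []).length : Int))
    ∧ ((¬ ∀ j < m, (pvKeys lc).getD j "" ≠ (pvKeys lc).getD m "") →
       pvGSeq lc vi (m + 1) = pvGSeq lc vi m) := by
  have hK := (pv_invariant lc vi hpre m (le_of_lt hm)).2
  constructor
  · intro hfo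
    have hfirst : ∀ j < m, PySem.Str.join " " (lc.getD j []) ≠ PySem.Str.join " " (lc.getD m []) := by
      intro j hj
      rw [← pv_keys_getD lc j (by omega), ← pv_keys_getD lc m hm]
      exact hfo j hj
    have hvn : m < vi.length := hpre m hm hfirst
    have hnz : m < (lc.zip vi).length := by rw [List.length_zip]; omega
    have hc : (pvBuild ((lc.zip vi).take m) (0, PySem.Dict.empty)).2.contains
        (PySem.Str.join " " (lc.getD m [])) = false := by
      cases hcc : (pvBuild ((lc.zip vi).take m) (0, PySem.Dict.empty)).2.contains
          (PySem.Str.join " " (lc.getD m [])) with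
      | false => rfl
      | true =>
          obtain ⟨j, hj, hje⟩ := (hK _).mp hcc
          exact absurd hje (hfirst j hj)
    have hpair : (lc.zip vi)[m]'hnz = (lc[m]'hm, vi[m]'hvn) := by rw [List.getElem_zip]
    have htake : (lc.zip vi).take (m + 1) = (lc.zip vi).take m ++ [(lc[m]'hm, vi[m]'hvn)] := by
      rw [List.take_succ, List.getElem?_eq_getElem hnz, hpair]; rfl
    unfold pvGSeq
    rw [htake, pvBuild_append]
    simp only [pvBuild]
    rw [← List.getD_eq_getElem lc [] hm, ← List.getD_eq_getElem vi [] hvn,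
        if_neg (by simp only [List.getD_eq_getElem?_getD] at hc; simp [hc])]
  · intro hfo
    push_neg at hfo
    obtain ⟨j, hj, hje⟩ := hfo
    have hje' : PySem.Str.join " " (lc.getD j []) = PySem.Str.join " " (lc.getD m []) := by
      rw [← pv_keys_getD lc j (by omega), ← pv_keys_getD lc m hm]
      simpa using hje
    have hc : (pvBuild ((lc.zip vi).take m) (0, PySem.Dict.empty)).2.contains
        (PySem.Str.join " " (lc.getD m [])) = true := (hK _).mpr ⟨j, hj, hje'⟩
    unfold pvGSeq
    rw [List.take_succ]
    cases hzn : (lc.zip vi)[m]? with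
    | none => simp
    | some p =>
        have hnz : m < (lc.zip vi).length := by
          by_contra hge
          rw [List.getElem?_eq_none (by omega)] at hzn; cases hzn
        have hp : p = ((lc.zip vi)[m]'hnz) := by
          rw [List.getElem?_eq_getElem hnz] at hzn; exact (Option.some_inj.mp hzn).symm
        have hfst : p.1 = lc[m]'hm := by rw [hp, List.getElem_zip]
        simp only [Option.toList, pvBuild_append]
        simp only [pvBuild]
        rw [if_pos (by rw [hfst, ← List.getD_eq_getElem lc [] hm]; exact hc)]

-- B's base/counter fold computes the pvGSeq prefix sums
theorem pv_base_fold (lc : List (List String)) (vi : List (List (Option Int)))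
    (hpre : Pre_naive_algo_variable_id_assignment lc vi) (m : Nat) (hm : m ≤ lc.length) :
    (PySem.List.pyRange 0 (m : Int) 1).foldl
      (fun (p : List Int × Int) (i : Int) =>
        (p.1 ++ [p.2],
         if PySem.List.pyGetD ((pvKeys lc).map (fun k => (((PySem.List.index? (pvKeys lc) k).getD 0 : Nat) : Int))) i (-1) == i
         then p.2 + ((PySem.List.pyGetD vi i []).length : Int) else p.2))
      ([], 0)
    = ((List.range m).map (fun j => pvGSeq lc vi j), pvGSeq lc vi m) := by
  induction m with
  | zero => simp [PySem.List.pyRange_one_eq_nil, pvGSeq, pvBuild]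
  | succ m ih =>
      have hm' : m ≤ lc.length := Nat.le_of_succ_le hm
      have hmlt : m < lc.length := hm
      have hcast : ((m + 1 : Nat) : Int) = (m : Int) + 1 := by push_cast; ring
      rw [hcast, pv_range_snoc, ih hm']
      obtain ⟨f, hfval, hle, heq, hprev⟩ := pv_first_val lc m hmlt
      obtain ⟨hstepF, hstepD⟩ := pv_gseq_step lc vi hpre m hmlt
      by_cases hfo : ∀ j < m, (pvKeys lc).getD j "" ≠ (pvKeys lc).getD m ""
      · have hfm : f = m := by
          rcases Nat.lt_or_ge f m with hlt | hge
          · exact absurd heq (hfo f hlt)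
          · omega
        rw [hfval, hfm]
        simp only [beq_self_eq_true, if_true, PySem.List.pyGetD_natCast]
        rw [hstepF hfo, List.range_succ]
        simp
      · have hfm : f ≠ m := by
          intro he; subst he; exact hfo hprev
        rw [hfval]
        have hbeq : (((f : Int)) == ((m : Int))) = false := by
          simp [hfm]
        rw [hbeq]
        simp only [Bool.false_eq_true, if_false]
        rw [hstepD hfo, List.range_succ]
        simp

-- the final table's value at a key first occurring at f
theorem pv_table_val (lc : List (List String)) (vi : List (List (Option Int)))
    (hpre : Pre_naive_algo_variable_id_assignment lc vi) (f : Nat) (hf : f < lc.length)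
    (hfo : ∀ j < f, (pvKeys lc).getD j "" ≠ (pvKeys lc).getD f "") :
    (pvTable lc vi).getD ((pvKeys lc).getD f "") [] = pvIdsFrom (pvGSeq lc vi f) (vi.getD f []) := by
  have hK := (pv_invariant lc vi hpre f (le_of_lt hf)).2
  have hfirst : ∀ j < f, PySem.Str.join " " (lc.getD j []) ≠ PySem.Str.join " " (lc.getD f []) := by
    intro j hj
    rw [← pv_keys_getD lc j (by omega), ← pv_keys_getD lc f hf]
    exact hfo j hj
  have hvn : f < vi.length := hpre f hf hfirst
  have hnz : f < (lc.zip vi).length := by rw [List.length_zip]; omega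
  have hc : (pvBuild ((lc.zip vi).take f) (0, PySem.Dict.empty)).2.contains
      (PySem.Str.join " " (lc.getD f [])) = false := by
    cases hcc : (pvBuild ((lc.zip vi).take f) (0, PySem.Dict.empty)).2.contains
        (PySem.Str.join " " (lc.getD f [])) with
    | false => rfl
    | true =>
        obtain ⟨j, hj, hje⟩ := (hK _).mp hcc
        exact absurd hje (hfirst j hj)
  have hpair : (lc.zip vi)[f]'hnz = (lc[f]'hf, vi[f]'hvn) := by rw [List.getElem_zip]
  have htake : (lc.zip vi).take (f + 1) = (lc.zip vi).take f ++ [(lc[f]'hf, vi[f]'hvn)] := by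
    rw [List.take_succ, List.getElem?_eq_getElem hnz, hpair]; rfl
  have hbuild : pvBuild ((lc.zip vi).take (f + 1)) (0, PySem.Dict.empty)
      = (pvGSeq lc vi f + ((vi.getD f []).length : Int),
         (pvBuild ((lc.zip vi).take f) (0, PySem.Dict.empty)).2.insert
           (PySem.Str.join " " (lc.getD f [])) (pvIdsFrom (pvGSeq lc vi f) (vi.getD f []))) := by
    rw [htake, pvBuild_append]
    simp only [pvBuild]
    rw [← List.getD_eq_getElem lc [] hf, ← List.getD_eq_getElem vi [] hvn,
        if_neg (by simp only [List.getD_eq_getElem?_getD] at hc; simp [hc])]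
    rfl
  have hins : (pvBuild ((lc.zip vi).take (f + 1)) (0, PySem.Dict.empty)).2.get?
      (PySem.Str.join " " (lc.getD f []))
      = some (pvIdsFrom (pvGSeq lc vi f) (vi.getD f [])) := by
    rw [hbuild]
    exact PySem.Dict.get?_insert_self _ _ _
  have hdecomp : pvBuild (lc.zip vi) (0, PySem.Dict.empty)
      = pvBuild ((lc.zip vi).drop (f + 1)) (pvBuild ((lc.zip vi).take (f + 1)) (0, PySem.Dict.empty)) := by
    conv_lhs => rw [(List.take_append_drop (f + 1) (lc.zip vi)).symm]
    rw [pvBuild_append]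
  have hfin : (pvTable lc vi).get? (PySem.Str.join " " (lc.getD f []))
      = some (pvIdsFrom (pvGSeq lc vi f) (vi.getD f [])) := by
    unfold pvTable
    rw [hdecomp]
    exact pvBuild_persist _ _ _ _ hins
  rw [pv_keys_getD lc f hf, PySem.Dict.getD_eq_get?_getD, hfin]
  rfl

-- main equivalence
theorem pv_main (lc : List (List String)) (vi : List (List (Option Int)))
    (hpre : Pre_naive_algo_variable_id_assignment lc vi) :
    naive_algo_variable_id_assignment lc vi = naive_algo_variable_id_assignment_alt lc vi := by
  have hA : naive_algo_variable_id_assignment lc vi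
      = lc.map (fun ws => (pvTable lc vi).getD (PySem.Str.join " " ws) []) := by
    rw [pvA_eq_step_fold, (pv_invariant lc vi hpre lc.length le_rfl).1]
    simp [pvTable]
  rw [hA]
  simp only [naive_algo_variable_id_assignment_alt]
  rw [show (lc.map (fun ws => PySem.Str.join " " ws)) = pvKeys lc from rfl]
  have hlen : (pvKeys lc).length = lc.length := by simp [pvKeys]
  rw [hlen, pv_base_fold lc vi hpre lc.length le_rfl]
  apply List.ext_getElem
  · simp [pv_pyRange_natCast]
  · intro i h1 h2
    have hi : i < lc.length := by simpa using h1
    simp only [pv_pyRange_natCast, List.map_map, Function.comp_def, List.getElem_map,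
      List.getElem_range]
    obtain ⟨f, hfval, hle, heq, hprev⟩ := pv_first_val lc i hi
    rw [hfval]
    have hflt : f < lc.length := by omega
    have hfo : ∀ j < f, (pvKeys lc).getD j "" ≠ (pvKeys lc).getD f "" := by
      intro j hj; rw [heq]; exact hprev j hj
    rw [PySem.List.pyGetD_natCast]
    rw [List.getD_eq_getElem _ _ (by simpa using hflt), List.getElem_map, List.getElem_range]
    obtain ⟨f', hfval', hle', heq', hprev'⟩ := pv_first_val lc f hflt
    have hff : f' = f := by
      rcases Nat.lt_or_ge f' f with hlt | hge
      · exact absurd heq' (hfo f' hlt)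
      · omega
    rw [hff] at hfval'
    rw [hfval']
    simp only [beq_self_eq_true, if_true, Option.getD_some]
    rw [PySem.List.pyGetD_natCast, PySem.List.pyGetD_natCast]
    rw [List.getD_eq_getElem _ _ (by simpa using hflt), List.getElem_map, List.getElem_range]
    have henum : (PySem.List.enumerate (vi.getD f [])).map
        (fun p => if p.2.isSome then some (pvGSeq lc vi f + p.1) else none)
        = pvIdsFrom (pvGSeq lc vi f) (vi.getD f []) := by
      simpa using pv_enum_map (vi.getD f []) 0 (pvGSeq lc vi f)
    rw [henum, ← pv_table_val lc vi hpre f hflt hfo, heq, pv_keys_getD lc i hi,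
        List.getD_eq_getElem lc [] hi]

-- ===== VERDICT (by name: the statement is the Claim_ definition above) =====
theorem naive_algo_variable_id_assignment_spec : Claim_equal_naive_algo_variable_id_assignment := by
  intro lc vi _ hpre
  exact pv_main lc vi hpre
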